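-- pv_equiv track=rewrite | github.com/EvilOlaf/build | tools/compare_patch_hunks.py | find_pattern_in_lines
-- ===== SOURCE A (Python) =====
-- from typing import List, Dict, Optional, Tuple
--
-- def find_pattern_in_lines(pattern: List[str], lines: List[str]) -> bool:
--     """
--     Find a pattern of consecutive lines in a list of lines.
--     Returns True if the pattern is found as a consecutive sequence.
--     """
--     if not pattern or not lines:
--         return False
--
--     pattern_len = len(pattern)
--
--     # Try to find the pattern starting at each position in lines
--     for i in range(len(lines) - pattern_len + 1):
--         # Check if pattern matches at position i
--         match = True
--         for j, pattern_line in enumerate(pattern):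
--             # Compare with some tolerance for whitespace
--             if lines[i + j].strip() != pattern_line.strip():
--                 match = False
--                 break
--
--         if match:
--             return True
--
--     return False
-- ===== SOURCE B (Python) =====
-- def find_pattern_in_lines(pattern, lines):
--     """
--     Find a pattern of consecutive lines in a list of lines.
--     Returns True if the pattern is found as a consecutive sequence.
--     """
--     if not pattern:
--         return False
--     p = [s.strip() for s in pattern]
--     l = [s.strip() for s in lines]
--     while len(l) >= len(p):
--         if l[:len(p)] == p:
--             return True
--         l = l[1:]
--     return False
-- ===== Notes on version B (the rewrite author's own statement) =====
-- stated objective: simpler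
-- what changed: B strips both sequences once up front and then scans by structural recursion over suffixes with a whole-prefix comparison, replacing A's index-arithmetic double loop with per-comparison re-stripping and a break flag.
import Mathlib
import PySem

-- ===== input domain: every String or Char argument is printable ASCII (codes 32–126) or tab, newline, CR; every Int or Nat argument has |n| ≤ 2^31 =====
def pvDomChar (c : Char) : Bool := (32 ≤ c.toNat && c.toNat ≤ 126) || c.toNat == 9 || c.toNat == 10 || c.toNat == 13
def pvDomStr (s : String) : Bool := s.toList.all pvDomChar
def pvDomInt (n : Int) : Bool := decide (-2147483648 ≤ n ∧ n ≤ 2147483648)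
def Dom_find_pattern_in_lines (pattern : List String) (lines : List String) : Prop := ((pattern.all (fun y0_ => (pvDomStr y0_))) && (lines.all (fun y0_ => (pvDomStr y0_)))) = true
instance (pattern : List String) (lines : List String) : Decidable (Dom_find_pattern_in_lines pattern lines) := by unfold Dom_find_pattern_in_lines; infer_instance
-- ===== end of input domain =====

-- B strips both line lists once and scans by structural recursion over suffixes with a
-- whole-prefix comparison, instead of A's index-arithmetic double loop that re-strips
-- lines on every window (objective: simpler).

-- ===== PORT A =====
-- inner loop of A at window start i: the break merely ends the loop with match = False,
-- so the loop computes 'all j'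
def pvMatchA (pattern : List String) (lines : List String) (i : Int) : Bool :=
  (PySem.List.enumerate pattern 0).all (fun jp =>
    match PySem.List.pyGet? lines (i + jp.1) with
    | some s => PySem.Str.strip s == PySem.Str.strip jp.2
    | none => false)   -- out-of-range index is unreachable for i drawn from A's range

def find_pattern_in_lines (pattern : List String) (lines : List String) : Bool :=
  if pattern.isEmpty || lines.isEmpty then false
  else
    (PySem.List.pyRange 0 ((lines.length : Int) - (pattern.length : Int) + 1) 1).any
      (fun i => pvMatchA pattern lines i)

-- ===== PORT B =====
-- the while loop of B: l[:len(p)] is l.take p.length, l[1:] is l.drop 1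
def pvSearchB (p : List String) (l : List String) : Bool :=
  if h1 : l.length < p.length then false
  else if h2 : l.take p.length = p then true
  else pvSearchB p (l.drop 1)
termination_by l.length
decreasing_by
  cases l with
  | nil =>
    simp only [List.length_nil, Nat.not_lt, Nat.le_zero] at h1
    exact absurd (by simp [List.eq_nil_of_length_eq_zero h1]) h2
  | cons a t => simp

def find_pattern_in_lines_alt (pattern : List String) (lines : List String) : Bool :=
  if pattern.isEmpty then false
  else pvSearchB (pattern.map PySem.Str.strip) (lines.map PySem.Str.strip)

-- ===== PRECONDITION & SPEC =====
def Spec_find_pattern_in_lines (pattern : List String) (lines : List String) (out : Bool) : Prop := out = find_pattern_in_lines_alt pattern lines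
instance (pattern : List String) (lines : List String) (out : Bool) : Decidable (Spec_find_pattern_in_lines pattern lines out) := by unfold Spec_find_pattern_in_lines; infer_instance

-- ===== CLAIM (what is proved, stated in full; the proofs are below) =====
def Claim_equal_find_pattern_in_lines : Prop := ∀ (pattern : List String) (lines : List String), Dom_find_pattern_in_lines pattern lines → Spec_find_pattern_in_lines pattern lines (find_pattern_in_lines pattern lines)

-- ===== LEMMAS AND PROOFS =====

-- B's scan finds exactly the windows where a full prefix of a suffix equals p
theorem pvSearchB_iff (p l : List String) :
    pvSearchB p l = true ↔ ∃ k : Nat, k + p.length ≤ l.length ∧ (l.drop k).take p.length = p := by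
  induction l with
  | nil =>
    rw [pvSearchB]
    by_cases hp : p = []
    · subst hp; simp
    · have hpl : 0 < p.length := List.length_pos_iff.mpr hp
      rw [dif_pos (by simpa using hpl)]
      simp only [Bool.false_eq_true, false_iff]
      rintro ⟨k, hk, -⟩
      simp only [List.length_nil] at hk; omega
  | cons a t ih =>
    rw [pvSearchB]
    split_ifs with h1 h2
    · simp only [Bool.false_eq_true, false_iff]
      rintro ⟨k, hk, -⟩
      simp only [List.length_cons] at h1 hk
      omega
    · simp only [true_iff]
      refine ⟨0, ?_, by simpa using h2⟩
      simp only [List.length_cons] at h1 ⊢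
      omega
    · simp only [List.drop_one, List.tail_cons] at *
      rw [ih]
      constructor
      · rintro ⟨k, hk, he⟩
        refine ⟨k + 1, ?_, by simpa [List.drop_succ_cons] using he⟩
        simp only [List.length_cons]; omega
      · rintro ⟨k, hk, he⟩
        cases k with
        | zero => exact absurd (by simpa using he) h2
        | succ k =>
          refine ⟨k, ?_, by simpa [List.drop_succ_cons] using he⟩
          simp only [List.length_cons] at hk; omega

-- A's inner loop at an in-range window start
theorem pvMatchA_iff (pattern lines : List String) (k : Nat)
    (hk : k + pattern.length ≤ lines.length) :
    pvMatchA pattern lines (k : Int) = true ↔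
      ((lines.map PySem.Str.strip).drop k).take pattern.length = pattern.map PySem.Str.strip := by
  unfold pvMatchA
  rw [List.all_eq_true]
  have hall : (∀ x ∈ PySem.List.enumerate pattern 0,
      (match PySem.List.pyGet? lines ((k : Int) + x.1) with
        | some s => PySem.Str.strip s == PySem.Str.strip x.2
        | none => false) = true) ↔
      ∀ j : Nat, ∀ hj : j < pattern.length,
        PySem.Str.strip lines[k + j] = PySem.Str.strip pattern[j] := by
    constructor
    · intro h j hj
      have hmem : ((0 : Int) + (j : Nat), pattern[j]) ∈ PySem.List.enumerate pattern 0 :=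
        (PySem.List.mem_enumerate_iff _ _ _).mpr ⟨j, hj, rfl⟩
      have := h _ hmem
      simp only [zero_add] at this
      have hget : PySem.List.pyGet? lines ((k : Int) + (j : Int)) = some lines[k + j] := by
        have : ((k : Int) + (j : Int)) = ((k + j : Nat) : Int) := by push_cast; ring
        rw [this, PySem.List.pyGet?_natCast, List.getElem?_eq_getElem (by omega)]
      rw [hget] at this
      simpa using this
    · intro h x hx
      obtain ⟨j, hj, rfl⟩ := (PySem.List.mem_enumerate_iff _ _ _).mp hx
      simp only [zero_add]
      have hget : PySem.List.pyGet? lines ((k : Int) + (j : Int)) = some lines[k + j] := by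
        have : ((k : Int) + (j : Int)) = ((k + j : Nat) : Int) := by push_cast; ring
        rw [this, PySem.List.pyGet?_natCast, List.getElem?_eq_getElem (by omega)]
      rw [hget]
      simpa using h j hj
  rw [hall]
  constructor
  · intro h
    apply List.ext_getElem
    · simp; omega
    · intro j hj1 hj2
      simp only [List.getElem_take, List.getElem_drop, List.getElem_map]
      simp only [List.length_map] at hj2
      exact h j hj2
  · intro he j hj
    have h1 := List.getElem_of_eq he (i := j) (by simp; omega)
    simpa [List.getElem_take, List.getElem_drop, List.getElem_map] using h1

theorem A_iff (pattern lines : List String) :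
    find_pattern_in_lines pattern lines = true ↔
      pattern ≠ [] ∧ ∃ k : Nat, k + pattern.length ≤ lines.length ∧
        ((lines.map PySem.Str.strip).drop k).take pattern.length = pattern.map PySem.Str.strip := by
  unfold find_pattern_in_lines
  by_cases hp : pattern = []
  · simp [hp]
  · by_cases hl : lines = []
    · subst hl
      rw [if_pos (by simp)]
      simp only [Bool.false_eq_true, false_iff]
      rintro ⟨-, k, hk, -⟩
      have : 0 < pattern.length := List.length_pos_iff.mpr hp
      simp only [List.length_nil] at hk; omega
    · rw [if_neg (by simp [hp, hl])]
      rw [List.any_eq_true]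
      constructor
      · rintro ⟨i, hi, hm⟩
        obtain ⟨hi0, hi1⟩ := (PySem.List.mem_pyRange_one).mp hi
        have hk : i.toNat + pattern.length ≤ lines.length := by omega
        have hieq : i = ((i.toNat : Nat) : Int) := by omega
        rw [hieq] at hm
        exact ⟨hp, i.toNat, hk, (pvMatchA_iff pattern lines i.toNat hk).mp hm⟩
      · rintro ⟨-, k, hk, he⟩
        refine ⟨(k : Int), (PySem.List.mem_pyRange_one).mpr ⟨by omega, by omega⟩, ?_⟩
        exact (pvMatchA_iff pattern lines k hk).mpr he

theorem B_iff (pattern lines : List String) :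
    find_pattern_in_lines_alt pattern lines = true ↔
      pattern ≠ [] ∧ ∃ k : Nat, k + pattern.length ≤ lines.length ∧
        ((lines.map PySem.Str.strip).drop k).take pattern.length = pattern.map PySem.Str.strip := by
  unfold find_pattern_in_lines_alt
  by_cases hp : pattern = []
  · simp [hp]
  · rw [if_neg (by simp [hp])]
    rw [pvSearchB_iff]
    simp only [List.length_map, hp, ne_eq, not_false_eq_true, true_and]

-- ===== VERDICT (by name: the statement is the Claim_ definition above) =====
theorem find_pattern_in_lines_spec : Claim_equal_find_pattern_in_lines := by
  intro pattern lines _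
  unfold Spec_find_pattern_in_lines
  rw [Bool.eq_iff_iff, A_iff, B_iff]
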